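-- pv_equiv track=rewrite | github.com/JVitorFlow/Dash | django-dashboard-kit/apps/ligobots/services.py | verificar_interrompida_ura_tradicional
-- ===== SOURCE A (Python) =====
-- def verificar_interrompida_ura_tradicional(ivr_events):
--     saudacao_passada = False
--     dtmf_ou_transferencia = False
--
--     for event in ivr_events:
--         step_name = event.get('step_name', '')
--
--         if step_name == "AudioSaudacao":
--             saudacao_passada = True
--
--         if step_name in ["IvrAudioDTMF", "IvrRedirect"]:
--             dtmf_ou_transferencia = True
--             break  # Não precisa continuar se encontrou DTMF ou transferência
--
--     # A chamada é interrompida na URA Tradicional se passou pela saudação e não teve DTMF ou transferência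
--     if saudacao_passada and not dtmf_ou_transferencia:
--         return True
--
--     return False
-- ===== SOURCE B (Python) =====
-- def verificar_interrompida_ura_tradicional(ivr_events):
--     # B: two independent any() scans instead of A's stateful early-break loop
--     return any(e.get('step_name', '') == "AudioSaudacao" for e in ivr_events) \
--         and not any(e.get('step_name', '') in ("IvrAudioDTMF", "IvrRedirect") for e in ivr_events)
-- ===== Notes on version B (the rewrite author's own statement) =====
-- stated objective: simpler
-- what changed: Replaced the stateful early-break loop over two mutable flags with two independent any() scans combined by a short-circuit 'and' (the break is redundant because any DTMF/Redirect event forces False).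
import Mathlib
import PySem

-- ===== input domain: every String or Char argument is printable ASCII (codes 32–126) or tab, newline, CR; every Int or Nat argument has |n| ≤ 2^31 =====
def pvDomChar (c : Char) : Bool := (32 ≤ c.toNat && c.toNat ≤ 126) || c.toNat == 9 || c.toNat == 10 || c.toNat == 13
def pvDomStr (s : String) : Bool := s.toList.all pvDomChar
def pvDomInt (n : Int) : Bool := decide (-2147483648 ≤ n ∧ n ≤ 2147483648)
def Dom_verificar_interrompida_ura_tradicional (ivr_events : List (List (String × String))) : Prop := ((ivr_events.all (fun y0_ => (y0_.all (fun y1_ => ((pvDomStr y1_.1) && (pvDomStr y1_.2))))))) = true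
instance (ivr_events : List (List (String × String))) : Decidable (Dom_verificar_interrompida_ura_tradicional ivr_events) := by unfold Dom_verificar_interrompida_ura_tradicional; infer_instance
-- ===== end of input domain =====

-- ===== PORT A =====
-- B replaces A's stateful early-break loop with two independent any() scans; return-value equivalence only.
-- event.get('step_name', '') → (PySem.Dict.ofList event).getD "step_name" ""
def pvStepName (event : List (String × String)) : String :=
  (PySem.Dict.ofList event).getD "step_name" ""

-- A's for-loop with break: structural recursion carrying the two flags; returns (saudacao_passada, dtmf_ou_transferencia)
def pvLoopA (events : List (List (String × String))) (saudacao : Bool) : Bool × Bool :=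
  match events with
  | [] => (saudacao, false)
  | event :: rest =>
    let step_name := pvStepName event
    let saudacao := if step_name == "AudioSaudacao" then true else saudacao
    if step_name == "IvrAudioDTMF" || step_name == "IvrRedirect" then (saudacao, true)
    else pvLoopA rest saudacao

def verificar_interrompida_ura_tradicional (ivr_events : List (List (String × String))) : Bool :=
  let r := pvLoopA ivr_events false
  if r.1 && !r.2 then true else false

-- ===== PORT B =====
def verificar_interrompida_ura_tradicional_alt (ivr_events : List (List (String × String))) : Bool :=
  (ivr_events.any (fun e => pvStepName e == "AudioSaudacao"))
    && !(ivr_events.any (fun e => pvStepName e == "IvrAudioDTMF" || pvStepName e == "IvrRedirect"))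

-- ===== PRECONDITION & SPEC =====
def Spec_verificar_interrompida_ura_tradicional (ivr_events : List (List (String × String))) (out : Bool) : Prop := out = verificar_interrompida_ura_tradicional_alt ivr_events
instance (ivr_events : List (List (String × String))) (out : Bool) : Decidable (Spec_verificar_interrompida_ura_tradicional ivr_events out) := by unfold Spec_verificar_interrompida_ura_tradicional; infer_instance

-- ===== CLAIM (what is proved, stated in full; the proofs are below) =====
def Claim_equal_verificar_interrompida_ura_tradicional : Prop := ∀ (ivr_events : List (List (String × String))), Dom_verificar_interrompida_ura_tradicional ivr_events → Spec_verificar_interrompida_ura_tradicional ivr_events (verificar_interrompida_ura_tradicional ivr_events)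

-- ===== LEMMAS AND PROOFS =====

-- ===== VERDICT (by name: the statement is the Claim_ definition above) =====
theorem pvLoopA_key (events : List (List (String × String))) (s : Bool) :
    (let r := pvLoopA events s; if r.1 && !r.2 then true else false)
      = ((s || events.any (fun e => pvStepName e == "AudioSaudacao"))
          && !(events.any (fun e => pvStepName e == "IvrAudioDTMF" || pvStepName e == "IvrRedirect"))) := by
  induction events generalizing s with
  | nil => simp [pvLoopA]
  | cons e rest ih =>
    simp only [pvLoopA, List.any_cons]
    by_cases hd : (pvStepName e == "IvrAudioDTMF" || pvStepName e == "IvrRedirect") = true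
    · simp [hd]
    · have hd' : (pvStepName e == "IvrAudioDTMF" || pvStepName e == "IvrRedirect") = false := by
        simpa using hd
      simp only [hd', Bool.false_eq_true, if_false]
      by_cases hs : (pvStepName e == "AudioSaudacao") = true
      · simpa [hs] using ih true
      · simpa [hs] using ih s

theorem verificar_interrompida_ura_tradicional_spec : Claim_equal_verificar_interrompida_ura_tradicional := by
  intro ivr_events _
  unfold Spec_verificar_interrompida_ura_tradicional verificar_interrompida_ura_tradicional verificar_interrompida_ura_tradicional_alt
  simpa using pvLoopA_key ivr_events false
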